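-- pv_equiv track=rewrite | github.com/diyaquanauts/DiyAquanauts-HoldingCell | Installer/storageServiceScripts/StoreItem.py | encodeToBaseX
-- ===== SOURCE A (Python) =====
-- def encodeToBaseX(num, alphabet="abcdefghijklmnopqrstuvwxyz"):
--     base = len(alphabet)
--     encoded = ""
--     while num > 0:
--         remainder = num % base
--         encoded = alphabet[remainder] + encoded
--         num //= base
--     return encoded
-- ===== SOURCE B (Python) =====
-- def encodeToBaseX(num, alphabet="abcdefghijklmnopqrstuvwxyz"):
--     base = len(alphabet)
--     if num <= 0:
--         return ""
--     # find the largest power of base not exceeding num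
--     p = 1
--     while p <= num // base:
--         p *= base
--     # emit digits most-significant first
--     chars = []
--     while p > 0:
--         chars.append(alphabet[(num // p) % base])
--         p //= base
--     return "".join(chars)
-- ===== Notes on version B (the rewrite author's own statement) =====
-- stated objective: alternative
-- what changed: B replaces A's single LSB-first loop that prepends digits to a string with two staged passes: first compute the highest power of the base not exceeding num, then emit digits most-significant first by indexed division (num//p)%base, joining a list at the end.
import Mathlib
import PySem

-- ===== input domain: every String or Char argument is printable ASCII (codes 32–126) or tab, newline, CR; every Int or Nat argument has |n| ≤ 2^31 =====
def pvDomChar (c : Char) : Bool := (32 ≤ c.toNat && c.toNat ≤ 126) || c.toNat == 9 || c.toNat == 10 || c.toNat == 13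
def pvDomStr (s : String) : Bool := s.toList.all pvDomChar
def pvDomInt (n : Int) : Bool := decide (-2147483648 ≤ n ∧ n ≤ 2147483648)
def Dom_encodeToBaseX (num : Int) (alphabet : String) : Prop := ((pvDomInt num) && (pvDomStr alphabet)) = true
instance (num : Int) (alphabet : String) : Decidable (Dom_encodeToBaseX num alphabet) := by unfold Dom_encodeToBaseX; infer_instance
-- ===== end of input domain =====

-- B re-implements the base-X encoder in two staged passes — first find the highest power of
-- the base not exceeding num, then emit digits most-significant first via (num // p) % base —
-- instead of A's single LSB-first loop prepending to a string; objective: alternative.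


-- ===== PORT A =====
-- while num > 0: remainder = num % base; encoded = alphabet[remainder] + encoded; num //= base
-- fuel = num.toNat + 1 only totalizes the loop: inside Pre_ (base ≥ 2) the loop runs at most
-- log2(num) + 1 ≤ num.toNat + 1 times, so the fuel is never exhausted there.
def pvEncLoopA (fuel : Nat) (num base : Int) (alpha : List Char) (encoded : List Char) : List Char :=
  match fuel with
  | 0 => encoded
  | f + 1 =>
    if num > 0 then
      let remainder := PySem.Int.mod num base
      -- alphabet[remainder]: none = IndexError (excluded by Pre_)
      match PySem.List.pyGet? alpha remainder with
      | none => encoded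
      | some c => pvEncLoopA f (PySem.Int.floordiv num base) base alpha (c :: encoded)
    else encoded

def encodeToBaseX (num : Int) (alphabet : String) : String :=
  String.ofList (pvEncLoopA (num.toNat + 1) num (PySem.Str.len alphabet) alphabet.toList [])

-- ===== PORT B =====
-- p = 1; while p <= num // base: p *= base        (highest power of base not exceeding num)
-- fuel num.toNat + 1 only totalizes: inside Pre_ (base ≥ 2) p at least doubles each step.
def pvPowLoopB (fuel : Nat) (p num base : Int) : Int :=
  match fuel with
  | 0 => p
  | f + 1 =>
    if p ≤ PySem.Int.floordiv num base then pvPowLoopB f (p * base) num base else p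

-- while p > 0: chars.append(alphabet[(num // p) % base]); p //= base
def pvEmitLoopB (fuel : Nat) (p num base : Int) (alpha : List Char) (chars : List Char) : List Char :=
  match fuel with
  | 0 => chars
  | f + 1 =>
    if p > 0 then
      match PySem.List.pyGet? alpha (PySem.Int.mod (PySem.Int.floordiv num p) base) with
      | none => chars  -- IndexError: excluded by Pre_
      | some c => pvEmitLoopB f (PySem.Int.floordiv p base) num base alpha (chars ++ [c])
    else chars

def encodeToBaseX_alt (num : Int) (alphabet : String) : String :=
  let base := PySem.Str.len alphabet
  if num ≤ 0 then ""
  else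
    String.ofList (pvEmitLoopB (num.toNat + 1) (pvPowLoopB (num.toNat + 1) 1 num base)
      num base alphabet.toList [])

-- ===== PRECONDITION & SPEC =====
-- Pre_ excludes positive num with an empty alphabet (A raises ZeroDivisionError) and with a
-- one-character alphabet (num //= 1 never shrinks: A's while-loop never terminates).
def Pre_encodeToBaseX (num : Int) (alphabet : String) : Prop :=
  num ≤ 0 ∨ 2 ≤ alphabet.toList.length
instance (num : Int) (alphabet : String) : Decidable (Pre_encodeToBaseX num alphabet) := by
  unfold Pre_encodeToBaseX; infer_instance

def pvWitness_encodeToBaseX : Int × String := (12345, "abcdefghijklmnopqrstuvwxyz")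

def Spec_encodeToBaseX (num : Int) (alphabet : String) (out : String) : Prop := out = encodeToBaseX_alt num alphabet
instance (num : Int) (alphabet : String) (out : String) : Decidable (Spec_encodeToBaseX num alphabet out) := by unfold Spec_encodeToBaseX; infer_instance

-- ===== CLAIM (what is proved, stated in full; the proofs are below) =====
def Claim_equal_encodeToBaseX : Prop := ∀ (num : Int) (alphabet : String), Dom_encodeToBaseX num alphabet → Pre_encodeToBaseX num alphabet → Spec_encodeToBaseX num alphabet (encodeToBaseX num alphabet)

-- ===== LEMMAS AND PROOFS =====

-- Mathematical digit list of num in the given base, most-significant first.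
def pvMsbDigits (num base : Int) : List Int :=
  if h : 0 < num ∧ 2 ≤ base then
    pvMsbDigits (num / base) base ++ [num % base]
  else []
termination_by num.toNat
decreasing_by
  have h1 : num / base < num := by
    apply Int.ediv_lt_of_lt_mul (by omega); nlinarith [h.1, h.2]
  have h2 : 0 ≤ num / base := Int.ediv_nonneg (by omega) (by omega)
  omega

def pvCharsOf (alpha : List Char) (ds : List Int) : List Char :=
  ds.map (fun d => (PySem.List.pyGet? alpha d).getD 'a')

-- The first k digits of num (positions k-1 .. 0), most-significant first, with leading zeros.
def pvPadDigits (k : Nat) (num base : Int) : List Int :=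
  match k with
  | 0 => []
  | k + 1 => (num / base ^ k) % base :: pvPadDigits k num base

theorem pvLoopA_eq (alpha : List Char) (base : Int) (hb : 2 ≤ base)
    (hlen : (alpha.length : Int) = base) :
    ∀ (fuel : Nat) (num : Int) (acc : List Char), num.toNat < fuel →
      pvEncLoopA fuel num base alpha acc = pvCharsOf alpha (pvMsbDigits num base) ++ acc := by
  intro fuel
  induction fuel with
  | zero => intro num acc h; omega
  | succ f ih =>
    intro num acc h
    by_cases hn : num > 0
    · have hb0 : (0:Int) < base := by omega
      have hmod : PySem.Int.mod num base = num % base := PySem.Int.mod_eq_emod_of_pos hb0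
      have hdiv : PySem.Int.floordiv num base = num / base := PySem.Int.floordiv_eq_ediv_of_pos hb0
      have h0 : 0 ≤ num % base := Int.emod_nonneg num (by omega)
      have h1 : num % base < (alpha.length : Int) := by rw [hlen]; exact Int.emod_lt_of_pos num hb0
      have hget := PySem.List.pyGet?_eq_some_getElem alpha h0 h1
      have hdlt : (num / base).toNat < f := by
        have l1 : num / base < num := by
          apply Int.ediv_lt_of_lt_mul (by omega); nlinarith
        have l2 : 0 ≤ num / base := Int.ediv_nonneg (by omega) (by omega)
        omega
      simp only [pvEncLoopA, hn, if_true, hmod, hdiv, hget]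
      rw [ih _ _ hdlt]
      conv_rhs => rw [pvMsbDigits, dif_pos ⟨hn, hb⟩]
      simp [pvCharsOf, hget]
    · have hmsb : pvMsbDigits num base = [] := by
        rw [pvMsbDigits, dif_neg]; intro hc; exact hn hc.1
      simp [pvEncLoopA, hn, hmsb, pvCharsOf]

theorem pvEmit_nonpos (num base : Int) (alpha : List Char) :
    ∀ (fuel : Nat) (p : Int) (chars : List Char), p ≤ 0 →
      pvEmitLoopB fuel p num base alpha chars = chars := by
  intro fuel p chars h
  cases fuel with
  | zero => rfl
  | succ f => simp [pvEmitLoopB, show ¬ p > 0 by omega]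

theorem pvPadDigits_shift (base : Int) (hb : 2 ≤ base) :
    ∀ (k : Nat) (num : Int), 0 ≤ num →
      pvPadDigits (k + 1) num base = pvPadDigits k (num / base) base ++ [num % base] := by
  intro k
  induction k with
  | zero => intro num hn; simp [pvPadDigits]
  | succ k ih =>
    intro num hn
    have key : num / base ^ (k + 1) = num / base / base ^ k := by
      rw [Int.ediv_ediv_of_nonneg (by omega : (0:Int) ≤ base), ← pow_succ']
    show (num / base ^ (k + 1)) % base :: pvPadDigits (k + 1) num base
        = pvPadDigits (k + 1) (num / base) base ++ [num % base]
    rw [key, ih num hn]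
    rfl

theorem pvPad_eq_msb (base : Int) (hb : 2 ≤ base) :
    ∀ (k : Nat) (num : Int), base ^ k ≤ num → num < base ^ (k + 1) →
      pvPadDigits (k + 1) num base = pvMsbDigits num base := by
  intro k
  induction k with
  | zero =>
    intro num hlo hhi
    have h0 : 0 < num := by simpa using hlo
    have hdz : num / base = 0 := Int.ediv_eq_zero_of_lt (by omega) (by simpa using hhi)
    rw [pvMsbDigits, dif_pos ⟨h0, hb⟩, hdz, pvMsbDigits]
    norm_num [pvPadDigits]
  | succ k ih =>
    intro num hlo hhi
    have hb0 : (0:Int) < base := by omega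
    have hpk : (0:Int) < base ^ (k + 1) := by positivity
    have hpos : 0 < num := by omega
    rw [pvPadDigits_shift base hb (k + 1) num (by omega)]
    have hlo' : base ^ k ≤ num / base := by
      rw [Int.le_ediv_iff_mul_le hb0, ← pow_succ]; exact hlo
    have hhi' : num / base < base ^ (k + 1) := by
      rw [Int.ediv_lt_iff_lt_mul hb0, ← pow_succ]; exact hhi
    rw [ih _ hlo' hhi']
    conv_rhs => rw [pvMsbDigits, dif_pos ⟨hpos, hb⟩]

theorem pvEmit_eq (alpha : List Char) (base : Int) (hb : 2 ≤ base)
    (hlen : (alpha.length : Int) = base) :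
    ∀ (k fuel : Nat) (num : Int) (chars : List Char), k < fuel → 0 ≤ num →
      pvEmitLoopB fuel (base ^ k) num base alpha chars
        = chars ++ pvCharsOf alpha (pvPadDigits (k + 1) num base) := by
  intro k
  induction k with
  | zero =>
    intro fuel num chars hf hn
    obtain ⟨f, rfl⟩ : ∃ f, fuel = f + 1 := ⟨fuel - 1, by omega⟩
    have hb0 : (0:Int) < base := by omega
    have hdiv1 : PySem.Int.floordiv num (base ^ 0) = num := by
      rw [pow_zero, PySem.Int.floordiv_eq_ediv_of_pos (by omega), Int.ediv_one]
    have hmod : PySem.Int.mod num base = num % base := PySem.Int.mod_eq_emod_of_pos hb0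
    have h0 : 0 ≤ num % base := Int.emod_nonneg num (by omega)
    have h1 : num % base < (alpha.length : Int) := by rw [hlen]; exact Int.emod_lt_of_pos num hb0
    have hget := PySem.List.pyGet?_eq_some_getElem alpha h0 h1
    have hdz : PySem.Int.floordiv (base ^ 0) base = 0 := by
      rw [pow_zero, PySem.Int.floordiv_eq_ediv_of_pos hb0]
      exact Int.ediv_eq_zero_of_lt (by omega) (by omega)
    have hp : (0:Int) < base ^ 0 := by norm_num
    simp only [pvEmitLoopB, hp, if_true, hdiv1, hmod, hget, hdz]
    rw [pvEmit_nonpos num base alpha f 0 _ (le_refl 0)]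
    simp [pvCharsOf, pvPadDigits, hget]
  | succ k ih =>
    intro fuel num chars hf hn
    obtain ⟨f, rfl⟩ : ∃ f, fuel = f + 1 := ⟨fuel - 1, by omega⟩
    have hb0 : (0:Int) < base := by omega
    have hp : (0:Int) < base ^ (k + 1) := by positivity
    have hdiv : PySem.Int.floordiv num (base ^ (k + 1)) = num / base ^ (k + 1) :=
      PySem.Int.floordiv_eq_ediv_of_pos hp
    have hmod : PySem.Int.mod (num / base ^ (k + 1)) base = num / base ^ (k + 1) % base :=
      PySem.Int.mod_eq_emod_of_pos hb0
    have h0 : 0 ≤ num / base ^ (k + 1) % base := Int.emod_nonneg _ (by omega)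
    have h1 : num / base ^ (k + 1) % base < (alpha.length : Int) := by
      rw [hlen]; exact Int.emod_lt_of_pos _ hb0
    have hget := PySem.List.pyGet?_eq_some_getElem alpha h0 h1
    have hpd : PySem.Int.floordiv (base ^ (k + 1)) base = base ^ k := by
      rw [PySem.Int.floordiv_eq_ediv_of_pos hb0, pow_succ, Int.mul_ediv_cancel _ (by omega)]
    simp only [pvEmitLoopB, hp, if_true, hdiv, hmod, hget, hpd]
    rw [ih f num _ (by omega) hn]
    simp [pvCharsOf, pvPadDigits, hget, List.append_assoc]

theorem pvPow_eq (base num : Int) (hb : 2 ≤ base) (_hn : 0 < num) :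
    ∀ (fuel : Nat) (i : Nat), base ^ i ≤ num → num < base ^ (i + fuel) →
      ∃ k : Nat, pvPowLoopB fuel (base ^ i) num base = base ^ k
        ∧ base ^ k ≤ num ∧ num < base ^ (k + 1) := by
  intro fuel
  induction fuel with
  | zero =>
    intro i hlo hhi
    rw [Nat.add_zero] at hhi
    omega
  | succ f ih =>
    intro i hlo hhi
    have hb0 : (0:Int) < base := by omega
    by_cases hg : base ^ (i + 1) ≤ num
    · have hguard : base ^ i ≤ PySem.Int.floordiv num base := by
        rw [PySem.Int.floordiv_eq_ediv_of_pos hb0, Int.le_ediv_iff_mul_le hb0, ← pow_succ]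
        exact hg
      simp only [pvPowLoopB, hguard, if_true, ← pow_succ]
      exact ih (i + 1) hg (by rw [show i + 1 + f = i + (f + 1) by omega]; exact hhi)
    · have hguard : ¬ base ^ i ≤ PySem.Int.floordiv num base := by
        rw [PySem.Int.floordiv_eq_ediv_of_pos hb0, Int.le_ediv_iff_mul_le hb0, ← pow_succ]
        exact hg
      simp only [pvPowLoopB, hguard, if_false]
      exact ⟨i, rfl, hlo, by omega⟩

-- ===== VERDICT (by name: the statement is the Claim_ definition above) =====
theorem encodeToBaseX_spec : Claim_equal_encodeToBaseX := by
  intro num alphabet _ hpre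
  unfold Spec_encodeToBaseX encodeToBaseX encodeToBaseX_alt
  by_cases hn : num ≤ 0
  · have hz : num.toNat = 0 := by omega
    rw [hz]
    simp [pvEncLoopA, show ¬ num > 0 by omega, hn]
  · have hnum : 0 < num := by omega
    have hblen : 2 ≤ alphabet.toList.length := hpre.resolve_left hn
    have hlen : ((alphabet.toList.length : Nat) : Int) = PySem.Str.len alphabet := by
      simp [PySem.Str.len_eq]
    have hb : 2 ≤ PySem.Str.len alphabet := by rw [← hlen]; exact_mod_cast hblen
    rw [if_neg hn]
    have hfuel : num < PySem.Str.len alphabet ^ (num.toNat + 1) := by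
      have hkk : ((num.toNat : Int)) < 2 ^ (num.toNat + 1) := by
        exact_mod_cast Nat.lt_two_pow_self.trans (Nat.pow_lt_pow_succ (by norm_num))
      have hle : (2:Int) ^ (num.toNat + 1) ≤ PySem.Str.len alphabet ^ (num.toNat + 1) :=
        pow_le_pow_left₀ (by norm_num) (by omega) _
      have hcast : ((num.toNat : Int)) = num := Int.toNat_of_nonneg (by omega)
      linarith
    obtain ⟨k, hpow, hklo, hkhi⟩ :=
      pvPow_eq (PySem.Str.len alphabet) num hb hnum (num.toNat + 1) 0
        (by simpa using hnum) (by simpa using hfuel)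
    have hk : k < num.toNat + 1 := by
      have h2k : (2:Int) ^ k ≤ PySem.Str.len alphabet ^ k := pow_le_pow_left₀ (by norm_num) (by omega) k
      have hkk : ((k : Nat) : Int) < 2 ^ k := by exact_mod_cast Nat.lt_two_pow_self
      have hlt : ((k : Nat) : Int) < num := by linarith
      omega
    rw [show (1:Int) = PySem.Str.len alphabet ^ 0 from (pow_zero _).symm, hpow,
      pvEmit_eq alphabet.toList (PySem.Str.len alphabet) hb hlen k (num.toNat + 1) num [] hk (by omega),
      pvPad_eq_msb (PySem.Str.len alphabet) hb k num hklo hkhi,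
      pvLoopA_eq alphabet.toList (PySem.Str.len alphabet) hb hlen (num.toNat + 1) num [] (by omega)]
    simp
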